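-- pv_equiv track=rewrite | github.com/ligsow6/DocGen | docgen/utils/code_inspect.py | _python_root_map
-- ===== SOURCE A (Python) =====
-- def _python_root_map(module_map: dict[str, str]) -> dict[str, str]:
--     roots: dict[str, str] = {}
--     collisions: set[str] = set()
--     for module, rel in module_map.items():
--         root = module.split(".", 1)[0]
--         if root in roots and roots[root] != rel:
--             collisions.add(root)
--         else:
--             roots[root] = rel
--     for root in collisions:
--         roots.pop(root, None)
--     return roots
-- ===== SOURCE B (Python) =====
-- def _python_root_map(module_map: dict[str, str]) -> dict[str, str]:
--     groups: dict[str, list[str]] = {}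
--     for module, rel in module_map.items():
--         groups.setdefault(module.split(".", 1)[0], []).append(rel)
--     return {root: rels[0] for root, rels in groups.items()
--             if all(r == rels[0] for r in rels)}
-- ===== Notes on version B (the rewrite author's own statement) =====
-- stated objective: alternative
-- what changed: B collects every rel value per root into a dict of lists in one pass and then keeps only the roots whose collected group is constant, instead of A's online scheme of a roots dict plus a collision set that evicts entries afterwards.
import Mathlib
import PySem

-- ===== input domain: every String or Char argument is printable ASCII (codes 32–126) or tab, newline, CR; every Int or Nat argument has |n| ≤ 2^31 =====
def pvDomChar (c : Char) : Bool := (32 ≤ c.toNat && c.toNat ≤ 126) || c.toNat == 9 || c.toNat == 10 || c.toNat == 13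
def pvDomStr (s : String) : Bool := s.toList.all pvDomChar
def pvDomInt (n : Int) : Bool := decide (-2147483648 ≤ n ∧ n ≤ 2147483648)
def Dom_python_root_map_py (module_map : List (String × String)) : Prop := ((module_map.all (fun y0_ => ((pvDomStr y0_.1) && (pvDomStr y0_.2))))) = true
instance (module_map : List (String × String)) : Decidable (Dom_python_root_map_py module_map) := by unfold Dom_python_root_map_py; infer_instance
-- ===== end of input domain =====

-- B groups every rel value per root (dict of lists) and filters constant groups afterwards,
-- instead of A's online collision detection with a roots dict plus an eviction set; same cost, alternative decomposition.

-- shared helper: module.split(".", 1)[0]  (split with a non-empty separator always returns a non-empty list)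
def pvRoot (m : String) : String := ((PySem.Str.splitMax? m "." 1).getD []).headD ""

-- ===== PORT A =====
def python_root_map_py (module_map : List (String × String)) : List (String × String) :=
  let st := module_map.foldl
    (fun (st : PySem.Dict String String × PySem.Set String) p =>
      let root := pvRoot p.1
      if st.1.contains root && !(st.1.get? root == some p.2)
      then (st.1, st.2.add root)
      else (st.1.insert root p.2, st.2))
    (PySem.Dict.empty, PySem.Set.empty)
  -- for root in collisions: roots.pop(root, None)
  (st.2.foldl (fun d r => d.erase r) st.1).items

-- ===== PORT B =====
def python_root_map_py_alt (module_map : List (String × String)) : List (String × String) :=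
  let groups := module_map.foldl
    (fun (g : PySem.Dict String (List String)) p => g.modify (pvRoot p.1) [] (· ++ [p.2]))
    PySem.Dict.empty
  (groups.items.filter (fun rp => rp.2.all (fun r => r == rp.2.headD ""))).map
    (fun rp => (rp.1, rp.2.headD ""))

-- ===== PRECONDITION & SPEC =====
def Spec_python_root_map_py (module_map : List (String × String)) (out : List (String × String)) : Prop := out = python_root_map_py_alt module_map
instance (module_map : List (String × String)) (out : List (String × String)) : Decidable (Spec_python_root_map_py module_map out) := by unfold Spec_python_root_map_py; infer_instance

-- ===== CLAIM (what is proved, stated in full; the proofs are below) =====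
def Claim_equal_python_root_map_py : Prop := ∀ (module_map : List (String × String)), Dom_python_root_map_py module_map → Spec_python_root_map_py module_map (python_root_map_py module_map)

-- ===== LEMMAS AND PROOFS =====

-- keyed view of the input: each pair replaced by (root, rel)
def pvKeyed (l : List (String × String)) : List (String × String) :=
  l.map (fun p => (pvRoot p.1, p.2))

-- A's loop step on a keyed pair
def pvStepA (st : PySem.Dict String String × PySem.Set String) (p : String × String) :
    PySem.Dict String String × PySem.Set String :=
  if st.1.contains p.1 && !(st.1.get? p.1 == some p.2)
  then (st.1, st.2.add p.1)
  else (st.1.insert p.1 p.2, st.2)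

def pvKs (l : List (String × String)) : List String := PySem.Set.ofList (l.map Prod.fst)
def pvGrp (l : List (String × String)) (k : String) : List String :=
  (l.filter (fun p => p.1 == k)).map Prod.snd
def pvFv (l : List (String × String)) (k : String) : String := (pvGrp l k).headD ""
def pvGood (l : List (String × String)) (k : String) : Bool :=
  (pvGrp l k).all (fun r => r == pvFv l k)

lemma pvGrp_append_singleton (l : List (String × String)) (x : String × String) (k : String) :
    pvGrp (l ++ [x]) k = pvGrp l k ++ (if x.1 == k then [x.2] else []) := by
  by_cases h : x.1 == k
  · simp [pvGrp, List.filter_append, h]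
  · simp only [Bool.not_eq_true] at h
    simp [pvGrp, List.filter_append, h]

lemma pvMem_iff_grp_ne_nil (l : List (String × String)) (k : String) :
    k ∈ l.map Prod.fst ↔ pvGrp l k ≠ [] := by
  simp [pvGrp, List.filter_eq_nil_iff]

-- the invariant of A's loop
lemma pvInvA (l : List (String × String)) :
    (l.foldl pvStepA (PySem.Dict.empty, PySem.Set.empty)).1.items
        = (pvKs l).map (fun k => (k, pvFv l k))
      ∧ ∀ k, (l.foldl pvStepA (PySem.Dict.empty, PySem.Set.empty)).2.contains k
        = (decide (k ∈ pvKs l) && !pvGood l k) := by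
  induction l using List.reverseRecOn with
  | nil =>
      constructor
      · simp [pvKs, PySem.Set.ofList_nil, PySem.Dict.empty]
      · intro k
        simp [pvKs, pvGood, pvGrp, pvFv, PySem.Set.empty_eq]
  | append_singleton l x ih =>
      obtain ⟨ih1, ih2⟩ := ih
      rw [List.foldl_append, List.foldl_cons, List.foldl_nil]
      set R := l.foldl pvStepA (PySem.Dict.empty, PySem.Set.empty) with hR
      obtain ⟨k₀, v⟩ := x
      have hkeys1 : R.1.keys = pvKs l := by
        show R.1.items.map Prod.fst = _
        rw [ih1, List.map_map]
        exact List.map_id' _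
      have hnod : R.1.keys.Nodup := by rw [hkeys1]; exact PySem.Set.nodup_ofList _
      have hcont : ∀ k, R.1.contains k = decide (k ∈ pvKs l) := by
        intro k; rw [PySem.Dict.contains_eq_decide_mem_keys, hkeys1]
      have hmemfst : ∀ k, k ∈ pvKs l ↔ k ∈ l.map Prod.fst := by
        intro k; exact PySem.Set.mem_ofList _ _
      have hget : ∀ k, k ∈ pvKs l → R.1.get? k = some (pvFv l k) := by
        intro k hk
        refine PySem.Dict.get?_of_mem_items _ ?_ hnod
        rw [ih1]; exact List.mem_map_of_mem hk
      have hmemR2 : ∀ k, k ∈ R.2 ↔ (k ∈ pvKs l ∧ pvGood l k = false) := by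
        intro k
        have h := ih2 k
        rw [PySem.Set.contains_eq_decide] at h
        constructor
        · intro hm
          have : decide (k ∈ R.2) = true := by simp [hm]
          rw [h] at this
          simp at this
          exact ⟨this.1, by simp [this.2]⟩
        · intro ⟨h1, h2⟩
          have : (decide (k ∈ pvKs l) && !pvGood l k) = true := by simp [h1, h2]
          rw [← h] at this
          simpa using this
      by_cases hk : k₀ ∈ pvKs l
      · -- root already seen
        have hksEq : pvKs (l ++ [(k₀, v)]) = pvKs l := by
          show PySem.Set.ofList ((l ++ [(k₀, v)]).map Prod.fst) = _
          rw [List.map_append]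
          simp only [List.map_cons, List.map_nil]
          rw [PySem.Set.ofList_append_singleton]
          exact PySem.Set.add_of_mem hk
        have hgrpne : pvGrp l k₀ ≠ [] := (pvMem_iff_grp_ne_nil l k₀).mp ((hmemfst k₀).mp hk)
        have hfv' : ∀ k, pvFv (l ++ [(k₀, v)]) k = pvFv l k := by
          intro k
          unfold pvFv
          rw [pvGrp_append_singleton]
          by_cases h : k = k₀
          · subst h
            cases hg : pvGrp l k with
            | nil => exact absurd hg hgrpne
            | cons a t => simp
          · have hb : ((k₀, v).1 == k) = false := by simpa using fun hh => h hh.symm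
            simp [hb]
        have hgood' : ∀ k, k ≠ k₀ → pvGood (l ++ [(k₀, v)]) k = pvGood l k := by
          intro k h
          have hb : ((k₀, v).1 == k) = false := by simpa using fun hh => h hh.symm
          unfold pvGood
          rw [pvGrp_append_singleton, hfv', hb]
          simp
        have hgoodk : pvGood (l ++ [(k₀, v)]) k₀ = (pvGood l k₀ && (v == pvFv l k₀)) := by
          unfold pvGood
          rw [pvGrp_append_singleton, hfv']
          simp
        by_cases hv : pvFv l k₀ = v
        · -- rel equal: insert same value back
          have hstep : pvStepA R (k₀, v) = (R.1.insert k₀ v, R.2) := by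
            unfold pvStepA
            rw [hget k₀ hk, hv]
            simp
          rw [hstep]
          constructor
          · rw [PySem.Dict.items_insert_of_contains _ _ (by rw [hcont]; simp [hk]),
                ih1, List.map_map, hksEq]
            apply List.map_congr_left
            intro k hkm
            by_cases h : k = k₀
            · subst h; simp [hfv', hv]
            · have hb : (k == k₀) = false := by simpa using h
              simp [Function.comp, hb, hfv']
          · intro k
            rw [ih2 k, hksEq]
            by_cases h : k = k₀
            · subst h; rw [hgoodk, hv]; simp
            · rw [hgood' k h]
        · -- rel differs: collision recorded, dict untouched
          have hstep : pvStepA R (k₀, v) = (R.1, R.2.add k₀) := by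
            unfold pvStepA
            rw [hget k₀ hk, hcont]
            simp [hk]
            exact fun hh => absurd hh hv
          rw [hstep]
          constructor
          · rw [ih1, hksEq]
            apply List.map_congr_left
            intro k _
            rw [hfv']
          · intro k
            rw [PySem.Set.contains_eq_decide, hksEq]
            by_cases h : k = k₀
            · subst h
              have hmem : k ∈ (R.2.add k) := (PySem.Set.mem_add _ _ _).mpr (Or.inr rfl)
              rw [hgoodk]
              have hvb : (v == pvFv l k) = false := by simpa using fun hh => hv hh.symm
              simp [hmem, hk, hvb]
            · have hmem : k ∈ (R.2.add k₀) ↔ k ∈ R.2 := by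
                rw [PySem.Set.mem_add]
                simp [h]
              rw [hgood' k h, ← ih2 k, PySem.Set.contains_eq_decide]
              simp [hmem]
      · -- fresh root: appended
        have hkf : k₀ ∉ l.map Prod.fst := fun h => hk ((hmemfst k₀).mpr h)
        have hksEq : pvKs (l ++ [(k₀, v)]) = pvKs l ++ [k₀] := by
          show PySem.Set.ofList ((l ++ [(k₀, v)]).map Prod.fst) = _
          rw [List.map_append]
          simp only [List.map_cons, List.map_nil]
          rw [PySem.Set.ofList_append_singleton]
          exact PySem.Set.add_of_not_mem hk
        have hgrpnil : pvGrp l k₀ = [] := by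
          by_contra hne
          exact hk ((hmemfst k₀).mpr ((pvMem_iff_grp_ne_nil l k₀).mpr hne))
        have hgrpk : pvGrp (l ++ [(k₀, v)]) k₀ = [v] := by
          rw [pvGrp_append_singleton, hgrpnil]; simp
        have hfv' : ∀ k, k ≠ k₀ → pvFv (l ++ [(k₀, v)]) k = pvFv l k := by
          intro k h
          have hb : ((k₀, v).1 == k) = false := by simpa using fun hh => h hh.symm
          unfold pvFv
          rw [pvGrp_append_singleton, hb]
          simp
        have hgood' : ∀ k, k ≠ k₀ → pvGood (l ++ [(k₀, v)]) k = pvGood l k := by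
          intro k h
          have hb : ((k₀, v).1 == k) = false := by simpa using fun hh => h hh.symm
          unfold pvGood
          rw [pvGrp_append_singleton, hb, hfv' k h]
          simp
        have hstep : pvStepA R (k₀, v) = (R.1.insert k₀ v, R.2) := by
          unfold pvStepA
          rw [hcont]
          simp [hk]
        rw [hstep]
        constructor
        · rw [PySem.Dict.items_insert_of_not_contains _ _ (by rw [hcont]; simp [hk]),
              ih1, hksEq, List.map_append]
          congr 1
          · apply List.map_congr_left
            intro k hkm
            rw [hfv' k (fun hh => hk (hh ▸ hkm))]
          · simp [pvFv, hgrpk]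
        · intro k
          rw [ih2 k, hksEq]
          by_cases h : k = k₀
          · subst h
            have hg : pvGood (l ++ [(k, v)]) k = true := by
              unfold pvGood
              rw [hgrpk]
              simp [pvFv, hgrpk]
            rw [hg]
            simp [hk]
          · rw [hgood' k h]
            simp [List.mem_append, h]

-- erasing every key of a list = filtering the items
lemma pvEraseFold (c : List String) (d : PySem.Dict String String) :
    (c.foldl (fun d r => d.erase r) d).items
      = d.items.filter (fun p => !c.contains p.1) := by
  induction c generalizing d with
  | nil => simp
  | cons r c ih =>
      rw [List.foldl_cons, ih]
      show List.filter _ (List.filter _ d.items) = _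
      rw [List.filter_filter]
      apply List.filter_congr
      intro p _
      by_cases h : p.1 = r
      · simp [h]
      · simp [List.mem_cons, h]

-- B's groups dict, characterised
lemma pvGroups (l : List (String × String)) :
    (l.foldl (fun (g : PySem.Dict String (List String)) p => g.modify p.1 [] (· ++ [p.2]))
        PySem.Dict.empty).items
      = (pvKs l).map (fun k => (k, pvGrp l k)) := by
  have hkeys : (l.foldl (fun (g : PySem.Dict String (List String)) p =>
      g.modify p.1 [] (· ++ [p.2])) PySem.Dict.empty).keys = pvKs l := by
    have h := PySem.Dict.keys_foldl_modify_key l Prod.fst ([] : List String)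
      (fun _ p => (· ++ [p.2])) PySem.Dict.empty
    simpa [pvKs, PySem.Set.update_empty] using h
  have hnod : (l.foldl (fun (g : PySem.Dict String (List String)) p =>
      g.modify p.1 [] (· ++ [p.2])) PySem.Dict.empty).keys.Nodup := by
    rw [hkeys]; exact PySem.Set.nodup_ofList _
  rw [PySem.Dict.items_eq_map_keys _ hnod [], hkeys]
  apply List.map_congr_left
  intro k _
  have h := PySem.Dict.getD_foldl_modify_append l PySem.Dict.empty k
  simp only [PySem.Dict.getD_empty, List.nil_append] at h
  simpa [pvGrp] using h

-- the two cores agree on any keyed list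
lemma pvCore (l : List (String × String)) :
    (((l.foldl pvStepA (PySem.Dict.empty, PySem.Set.empty)).2).foldl
        (fun d r => d.erase r) (l.foldl pvStepA (PySem.Dict.empty, PySem.Set.empty)).1).items
      = (((l.foldl (fun (g : PySem.Dict String (List String)) p => g.modify p.1 [] (· ++ [p.2]))
            PySem.Dict.empty).items.filter
              (fun rp => rp.2.all (fun r => r == rp.2.headD ""))).map
          (fun rp => (rp.1, rp.2.headD ""))) := by
  obtain ⟨h1, h2⟩ := pvInvA l
  rw [pvEraseFold, h1, pvGroups, List.filter_map, List.filter_map, List.map_map]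
  have hq : ∀ k ∈ pvKs l,
      ((fun p : String × String =>
          !(List.contains (l.foldl pvStepA (PySem.Dict.empty, PySem.Set.empty)).2 p.1)) ∘
        (fun k => (k, pvFv l k))) k
      = ((fun rp : String × List String => rp.2.all (fun r => r == rp.2.headD "")) ∘
        (fun k => (k, pvGrp l k))) k := by
    intro k hk
    simp only [Function.comp]
    rw [← PySem.Set.contains_eq_listContains, h2 k]
    simp [hk, pvGood, pvFv]
  rw [List.filter_congr hq]
  apply List.map_congr_left
  intro k _
  simp [Function.comp, pvFv]

-- ===== VERDICT (by name: the statement is the Claim_ definition above) =====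
theorem python_root_map_py_spec : Claim_equal_python_root_map_py := by
  intro mm _
  unfold Spec_python_root_map_py python_root_map_py python_root_map_py_alt
  have hA : mm.foldl
      (fun (st : PySem.Dict String String × PySem.Set String) p =>
        let root := pvRoot p.1
        if st.1.contains root && !(st.1.get? root == some p.2)
        then (st.1, st.2.add root)
        else (st.1.insert root p.2, st.2))
      (PySem.Dict.empty, PySem.Set.empty)
      = (pvKeyed mm).foldl pvStepA (PySem.Dict.empty, PySem.Set.empty) := by
    simp [pvKeyed, List.foldl_map, pvStepA]
  have hB : mm.foldl
      (fun (g : PySem.Dict String (List String)) p => g.modify (pvRoot p.1) [] (· ++ [p.2]))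
      PySem.Dict.empty
      = (pvKeyed mm).foldl
          (fun (g : PySem.Dict String (List String)) p => g.modify p.1 [] (· ++ [p.2]))
          PySem.Dict.empty := by
    simp [pvKeyed, List.foldl_map]
  simp only [hA, hB]
  exact (pvCore (pvKeyed mm)).symm ▸ rfl
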